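-- pv_equiv track=rewrite | github.com/juanvallaure1/TFGJuan | algoritmos_geneticos_para_la_composicion_musical.py | encontrar_tonica
-- ===== SOURCE A (Python) =====
-- def encontrar_tonica(acorde):
--     acorde_reordenado =sorted([i%12 for i in acorde])
--
--     dist1 = acorde_reordenado[1] - acorde_reordenado[0]
--     dist2 = acorde_reordenado[2] - acorde_reordenado[1]
--
--     if (dist1 == 4 and dist2 == 3):
--         return acorde_reordenado[0]
--
--     elif(dist1 == 3 and dist2 == 5):
--         return acorde_reordenado[2]
--
--     elif (dist1 == 5 and dist2 == 4):
--         return acorde_reordenado[1]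
-- ===== SOURCE B (Python) =====
-- def encontrar_tonica(acorde):
--     r = sorted(i % 12 for i in acorde)
--     trio = (r[0], r[1], r[2])
--     for n in trio:
--         if (n + 4) % 12 in trio and (n + 7) % 12 in trio:
--             return n
--     return None
-- ===== Notes on version B (the rewrite author's own statement) =====
-- stated objective: idiomatic
-- what changed: Instead of matching the two interval distances of the sorted pitch classes against three hardcoded (dist1, dist2) patterns, B scans the three candidate notes and returns the first whose major third and perfect fifth (mod 12) are both present among them.
import Mathlib
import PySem

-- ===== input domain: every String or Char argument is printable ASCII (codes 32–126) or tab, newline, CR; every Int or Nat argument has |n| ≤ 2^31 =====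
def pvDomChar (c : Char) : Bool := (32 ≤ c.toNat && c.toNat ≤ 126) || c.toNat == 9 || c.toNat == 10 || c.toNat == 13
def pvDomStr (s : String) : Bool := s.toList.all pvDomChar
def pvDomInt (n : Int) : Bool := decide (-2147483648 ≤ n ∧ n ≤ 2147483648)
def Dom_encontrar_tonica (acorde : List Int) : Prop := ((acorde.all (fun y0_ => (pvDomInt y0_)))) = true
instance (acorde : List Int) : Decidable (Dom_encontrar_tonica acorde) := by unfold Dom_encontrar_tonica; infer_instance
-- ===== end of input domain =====

-- B reframes the interval-pattern match as: return the first of the three sorted pitch classes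
-- whose major third and perfect fifth (mod 12) are both present among them (idiomatic, same cost).

-- ===== PORT A =====
def encontrar_tonica (acorde : List Int) : Option Int :=
  let r := PySem.List.sorted (acorde.map (fun i => PySem.Int.mod i 12)) (fun x => x) false
  match PySem.List.pyGet? r 0, PySem.List.pyGet? r 1, PySem.List.pyGet? r 2 with
  | some r0, some r1, some r2 =>
    let dist1 := r1 - r0
    let dist2 := r2 - r1
    if dist1 = 4 ∧ dist2 = 3 then some r0
    else if dist1 = 3 ∧ dist2 = 5 then some r2
    else if dist1 = 5 ∧ dist2 = 4 then some r1
    else none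
  | _, _, _ => none

-- ===== PORT B =====
def encontrar_tonica_alt (acorde : List Int) : Option Int :=
  let r := PySem.List.sorted (acorde.map (fun i => PySem.Int.mod i 12)) (fun x => x) false
  match PySem.List.pyGet? r 0 with
  | none => none
  | some r0 =>
    match PySem.List.pyGet? r 1 with
    | none => none
    | some r1 =>
      match PySem.List.pyGet? r 2 with
      | none => none
      | some r2 =>
        let trio := [r0, r1, r2]
        trio.find? (fun n =>
          trio.contains (PySem.Int.mod (n + 4) 12) && trio.contains (PySem.Int.mod (n + 7) 12))

-- ===== PRECONDITION & SPEC =====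
-- Python A raises IndexError on lists with fewer than 3 notes (acorde_reordenado[2]); B raises there too.
def Pre_encontrar_tonica (acorde : List Int) : Prop := 3 ≤ acorde.length
instance (acorde : List Int) : Decidable (Pre_encontrar_tonica acorde) := by unfold Pre_encontrar_tonica; infer_instance
def pvWitness_encontrar_tonica : List Int := [0, 4, 7]

def Spec_encontrar_tonica (acorde : List Int) (out : Option Int) : Prop := out = encontrar_tonica_alt acorde
instance (acorde : List Int) (out : Option Int) : Decidable (Spec_encontrar_tonica acorde out) := by unfold Spec_encontrar_tonica; infer_instance

-- ===== CLAIM (what is proved, stated in full; the proofs are below) =====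
def Claim_equal_encontrar_tonica : Prop := ∀ (acorde : List Int), Dom_encontrar_tonica acorde → Pre_encontrar_tonica acorde → Spec_encontrar_tonica acorde (encontrar_tonica acorde)

-- ===== LEMMAS AND PROOFS =====

-- A's head computation on the first three sorted pitch classes
def coreA (a b c : Int) : Option Int :=
  if b - a = 4 ∧ c - b = 3 then some a
  else if b - a = 3 ∧ c - b = 5 then some c
  else if b - a = 5 ∧ c - b = 4 then some b
  else none

-- B's head computation on the first three sorted pitch classes
def coreB (a b c : Int) : Option Int :=
  [a, b, c].find? (fun n =>
    [a, b, c].contains (PySem.Int.mod (n + 4) 12) && [a, b, c].contains (PySem.Int.mod (n + 7) 12))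

-- the triad characterisation, checked on all ordered bounded triples
lemma core_eq_nat : ∀ a ∈ List.range 12, ∀ b ∈ List.range 12, ∀ c ∈ List.range 12,
    a ≤ b → b ≤ c → coreA (a : Int) (b : Int) (c : Int) = coreB (a : Int) (b : Int) (c : Int) := by
  decide

lemma core_eq (a b c : Int) (ha : 0 ≤ a) (hab : a ≤ b) (hbc : b ≤ c) (hc : c < 12) :
    coreA a b c = coreB a b c := by
  have h := core_eq_nat a.toNat (List.mem_range.mpr (by omega)) b.toNat (List.mem_range.mpr (by omega))
      c.toNat (List.mem_range.mpr (by omega)) (by omega) (by omega)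
  rwa [Int.toNat_of_nonneg ha, Int.toNat_of_nonneg (by omega : (0:Int) ≤ b),
      Int.toNat_of_nonneg (by omega : (0:Int) ≤ c)] at h

-- ===== VERDICT (by name: the statement is the Claim_ definition above) =====
theorem encontrar_tonica_spec : Claim_equal_encontrar_tonica := by
  intro acorde _ hpre
  show encontrar_tonica acorde = encontrar_tonica_alt acorde
  unfold encontrar_tonica encontrar_tonica_alt
  set r := PySem.List.sorted (acorde.map (fun i => PySem.Int.mod i 12)) (fun x => x) false with hr
  have h3 : 3 ≤ r.length := by
    have hlen : r.length = acorde.length := by simp [hr, PySem.List.length_sorted]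
    unfold Pre_encontrar_tonica at hpre
    omega
  obtain ⟨a, b, c, t, hcons⟩ : ∃ a b c t, r = a :: b :: c :: t := by
    match r, h3 with
    | a :: b :: c :: t, _ => exact ⟨a, b, c, t, rfl⟩
    | [], h => simp at h
    | [x], h => simp at h
    | [x, y], h => simp at h
  have hmem : ∀ x ∈ r, 0 ≤ x ∧ x < 12 := by
    intro x hx
    rw [hr, PySem.List.mem_sorted] at hx
    obtain ⟨i, _, rfl⟩ := List.mem_map.mp hx
    exact ⟨PySem.Int.mod_nonneg i (by norm_num), PySem.Int.mod_lt i (by norm_num)⟩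
  have hpw : r.Pairwise (fun x y => x ≤ y) :=
    PySem.List.sorted_pairwise (acorde.map (fun i => PySem.Int.mod i 12)) (fun x => x)
  rw [hcons] at hmem hpw ⊢
  have ha : 0 ≤ a := (hmem a (by simp)).1
  have hc12 : c < 12 := (hmem c (by simp)).2
  have hab : a ≤ b := (List.pairwise_cons.mp hpw).1 b (by simp)
  have hbc : b ≤ c := (List.pairwise_cons.mp (List.pairwise_cons.mp hpw).2).1 c (by simp)
  have h0 : PySem.List.pyGet? (a :: b :: c :: t) 0 = some a := by
    simp [PySem.List.pyGet?, PySem.List.pyIdx?,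
      show (0:Int) ≤ (t.length:Int) + 1 + 1 from by omega]
  have h1 : PySem.List.pyGet? (a :: b :: c :: t) 1 = some b := by
    simp [PySem.List.pyGet?, PySem.List.pyIdx?,
      show (0:Int) ≤ (t.length:Int) + 1 from by omega]
  have h2 : PySem.List.pyGet? (a :: b :: c :: t) 2 = some c := by
    simp [PySem.List.pyGet?, PySem.List.pyIdx?,
      show (2:Int) ≤ (t.length:Int) + 1 + 1 from by omega]
  simp only [h0, h1, h2]
  exact core_eq a b c ha hab hbc hc12
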